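-- pv_equiv track=rewrite | github.com/Sudlivre/notebook | Algorithm/code/get_max_remove_number.py | get_max_remove_number
-- ===== SOURCE A (Python) =====
-- def get_max_remove_number(s, ss):
--     if not all([s, ss]):
--         return 0
--     if not (isinstance(s, str) or isinstance(ss, str)):
--         return 0
--     tt_list = [ss[0:index] + s + ss[index:] for index in range(len(ss))]
--     tt_list.append(ss + s)
--     tt_list = list(set(tt_list))
--     max_number = 0
--     for tt in tt_list:
--         tt_len = len(tt)
--         tt = list(tt)
--         count = remove_number(tt)
--         if count == tt_len:
--             return count
--         if count > max_number:
--             max_number = count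
--     return max_number
--
-- def remove_number(tt, count=0):
--     index, start, end = 0, 0, 0
--     rm_list = []
--     while index < len(tt) - 1:
--         if tt[index] == tt[index + 1]:
--             start = index
--             tt.append('$$')
--             for i in range(start, len(tt)):
--                 if tt[start] != tt[i]:
--                     end = i - 1
--                     rm_list.append((start, end))
--                     break
--             tt.pop()
--             index += end - start
--         index += 1
--     if not rm_list:
--         return count
--     len_tt = len(tt)
--     re_rm_list = reversed(rm_list)
--     for item in re_rm_list:
--         del tt[item[0]:item[1]+1]
--     new_count = count + len_tt - len(tt)
--     return remove_number(tt, count=new_count)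
-- ===== SOURCE B (Python) =====
-- # B: same result via run-length collapsing: repeatedly drop every run of >= 2
-- # equal adjacent chars (one linear grouping pass per round) and take the best
-- # count over all insertion positions -- no interval bookkeeping, no sentinel,
-- # no set-dedup, no early return.
--
-- def _pass(chars):
--     # one round: keep exactly the runs of length 1
--     out = []
--     i = 0
--     n = len(chars)
--     while i < n:
--         j = i + 1
--         while j < n and chars[j] == chars[i]:
--             j += 1
--         if j - i == 1:
--             out.append(chars[i])
--         i = j
--     return out
--
--
-- def _collapse(chars):
--     # iterate rounds until nothing shrinks
--     while True:
--         nxt = _pass(chars)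
--         if len(nxt) == len(chars):
--             return chars
--         chars = nxt
--
--
-- def get_max_remove_number(s, ss):
--     if not s or not ss:
--         return 0
--     best = 0
--     for i in range(len(ss) + 1):
--         t = ss[:i] + s + ss[i:]
--         chars = list(t)
--         removed = len(chars) - len(_collapse(chars))
--         best = max(best, removed)
--     return best
-- ===== Notes on version B (the rewrite author's own statement) =====
-- stated objective: simpler
-- what changed: Replaces A's index/sentinel machinery (while-loop collecting an interval list, '$$' sentinel append/pop, reversed slice deletions, recursion with a count accumulator, set-dedup and an early return) with a direct run-length grouping pass: one linear pass keeps exactly the length-1 runs, rounds repeat until nothing shrinks, and a plain max over all insertion positions replaces dedup plus early exit.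
import Mathlib
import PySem

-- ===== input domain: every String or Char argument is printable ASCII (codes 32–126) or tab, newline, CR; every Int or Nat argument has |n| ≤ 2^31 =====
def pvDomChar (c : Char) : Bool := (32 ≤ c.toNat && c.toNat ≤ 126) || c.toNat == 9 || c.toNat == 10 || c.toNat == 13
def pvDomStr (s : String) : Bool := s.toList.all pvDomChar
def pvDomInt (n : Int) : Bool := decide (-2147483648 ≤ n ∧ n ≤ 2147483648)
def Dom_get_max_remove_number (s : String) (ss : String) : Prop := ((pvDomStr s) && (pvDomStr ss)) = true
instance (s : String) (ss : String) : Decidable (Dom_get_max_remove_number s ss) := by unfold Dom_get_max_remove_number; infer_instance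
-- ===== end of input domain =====

-- B replaces A's index/sentinel/interval machinery by a plain run-length recursion
-- per round and a plain max over insertion positions (objective: simpler).
-- Python strings inside the scanned list are represented as their code-point
-- lists (List Char): the '$$' sentinel is ['$','$'], a character c is [c];
-- Python string equality is exactly List Char equality.

-- ===== PORT A =====

-- inner 'for i in range(start, len(tt)): if tt[start] != tt[i]: end = i-1; break'
-- (the fall-off-the-end branch returns i-1 too; it is unreachable in A's runs:
-- the appended '$$' sentinel always differs from the 1-char elements)
def aScan (tt' : List (List Char)) (v : List Char) (i : Nat) : Nat :=
  if _h : i < tt'.length then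
    if tt'[i] ≠ v then i - 1 else aScan tt' v (i + 1)
  else i - 1
termination_by tt'.length - i

-- 'tt.append("$$"); …scan…; tt.pop()' — the scan over tt with the sentinel
def aFindEnd (tt : List (List Char)) (start : Nat) : Nat :=
  let tt' := tt ++ [['$', '$']]
  aScan tt' (tt'.getD start []) start

-- the 'while index < len(tt) - 1' loop collecting rm_list
-- ('index += end - start; index += 1' is written idx + (e - idx) + 1; in every
-- reachable state e ≥ idx so this is A's e + 1)
def aLoop (tt : List (List Char)) (idx : Nat) (rm : List (Nat × Nat)) :
    List (Nat × Nat) :=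
  if _h : idx < tt.length - 1 then
    if tt[idx]? = tt[idx + 1]? then
      let e := aFindEnd tt idx
      aLoop tt (idx + (e - idx) + 1) (rm ++ [(idx, e)])
    else aLoop tt (idx + 1) rm
  else rm
termination_by tt.length - idx
decreasing_by all_goals omega

-- 'for item in reversed(rm_list): del tt[item[0]:item[1]+1]'
def aDelete (t : List (List Char)) (rm : List (Nat × Nat)) : List (List Char) :=
  rm.reverse.foldl (fun t p => t.take p.1 ++ t.drop (p.2 + 1)) t

-- remove_number(tt, count); fuel = len(tt)+1 is a totality guard only: each
-- recursive call strictly shrinks tt, so the 0 branch is never reached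
def removeNumber (fuel : Nat) (tt : List (List Char)) (count : Int) : Int :=
  match fuel with
  | 0 => count
  | fuel + 1 =>
    let rm := aLoop tt 0 []
    if rm = [] then count
    else
      let lenTt : Int := tt.length
      let tt2 := aDelete tt rm
      removeNumber fuel tt2 (count + lenTt - tt2.length)

-- 'for tt in tt_list: …' with the early return on count == tt_len
def aMaxLoop (l : List (List Char)) (max_number : Int) : Int :=
  match l with
  | [] => max_number
  | tt :: rest =>
    let tt_len : Int := tt.length
    let ttl := tt.map (fun c => [c])        -- list(tt): 1-char strings
    let count := removeNumber (ttl.length + 1) ttl 0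
    if count = tt_len then count
    else if count > max_number then aMaxLoop rest count
    else aMaxLoop rest max_number

def get_max_remove_number (s : String) (ss : String) : Int :=
  -- 'if not all([s, ss]): return 0'; the isinstance guard is identically
  -- False for str inputs and drops out
  if s.toList = [] ∨ ss.toList = [] then 0
  else
    let sl := s.toList
    let ssl := ss.toList
    let tt_list := (PySem.List.pyRange 0 ssl.length 1).map
      (fun index =>
        PySem.List.slice ssl (some 0) (some index) ++ sl ++
          PySem.List.slice ssl (some index) none)
    let tt_list := tt_list ++ [ssl ++ sl]
    let tt_list := PySem.Set.ofList tt_list   -- list(set(tt_list))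
    aMaxLoop tt_list 0

-- ===== PORT B =====

-- the 'while run < len(chars) and chars[run] == head' counter in _pass
def bRunCount (chars : List Char) (head : Char) (run : Nat) : Nat :=
  if _h : run < chars.length then
    if chars[run] = head then bRunCount chars head (run + 1) else run
  else run
termination_by chars.length - run

theorem bRunCount_ge (chars : List Char) (head : Char) (run : Nat) :
    run ≤ bRunCount chars head run := by
  fun_induction bRunCount with
  | case1 ih => omega
  | case2 => omega
  | case3 => omega

-- _pass: 'while i < n' over the run starts, keeping exactly the runs of
-- length 1 ('chars[i]' is in range whenever read; getD's default is unused)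
def bPassLoop (chars : List Char) (i : Nat) (out : List Char) : List Char :=
  if _h : i < chars.length then
    let j := bRunCount chars (chars.getD i default) (i + 1)
    bPassLoop chars j (if j - i = 1 then out ++ [chars.getD i default] else out)
  else out
termination_by chars.length - i
decreasing_by
  have := bRunCount_ge chars (chars.getD i default) (i + 1)
  omega

def bPass (chars : List Char) : List Char := bPassLoop chars 0 []

-- _collapse: rounds until nothing shrinks; fuel = len(chars)+1 is a totality
-- guard only (each executed round strictly shrinks)
def bCollapse (fuel : Nat) (chars : List Char) : List Char :=
  match fuel with
  | 0 => chars
  | fuel + 1 =>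
    let nxt := bPass chars
    if nxt.length = chars.length then chars else bCollapse fuel nxt

def get_max_remove_number_alt (s : String) (ss : String) : Int :=
  if s.toList = [] ∨ ss.toList = [] then 0
  else
    let sl := s.toList
    let ssl := ss.toList
    (PySem.List.pyRange 0 (ssl.length + 1) 1).foldl
      (fun best i =>
        let chars := PySem.List.slice ssl none (some i) ++ sl ++
          PySem.List.slice ssl (some i) none
        max best ((chars.length : Int) -
          ((bCollapse (chars.length + 1) chars).length : Int)))
      0

-- ===== PRECONDITION & SPEC =====
def Spec_get_max_remove_number (s : String) (ss : String) (out : Int) : Prop := out = get_max_remove_number_alt s ss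
instance (s : String) (ss : String) (out : Int) : Decidable (Spec_get_max_remove_number s ss out) := by unfold Spec_get_max_remove_number; infer_instance

-- ===== CLAIM (what is proved, stated in full; the proofs are below) =====
def Claim_equal_get_max_remove_number : Prop := ∀ (s : String) (ss : String), Dom_get_max_remove_number s ss → Spec_get_max_remove_number s ss (get_max_remove_number s ss)

-- ===== LEMMAS AND PROOFS =====


-- run-length spec and generic lemmas ------------------------------------------

theorem dropWhile_eq_drop {α : Type} (p : α → Bool) (l : List α) :
    List.dropWhile p l = l.drop (l.takeWhile p).length := by
  conv_rhs => rw [← List.takeWhile_append_dropWhile (p := p) (l := l)]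
  rw [List.drop_left' (by simp)]

-- one full removal round: keep exactly the runs of length 1
def reduce1 {α : Type} [DecidableEq α] : List α → List α
  | [] => []
  | a :: l =>
    if (l.takeWhile (· = a)).length = 0 then a :: reduce1 (l.dropWhile (· = a))
    else reduce1 (l.dropWhile (· = a))
termination_by l => l.length
decreasing_by all_goals
  (have := (List.dropWhile_sublist (l := l) (· = a)).length_le; simp; omega)

theorem length_reduce1_le {α : Type} [DecidableEq α] (l : List α) :
    (reduce1 l).length ≤ l.length := by
  fun_induction reduce1 with
  | case1 => simp
  | case2 a l h ih =>
      have := (List.dropWhile_sublist (l := l) (· = a)).length_le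
      simp; omega
  | case3 a l h ih =>
      have := (List.dropWhile_sublist (l := l) (· = a)).length_le
      simp; omega

theorem reduce1_lt_of_ne {α : Type} [DecidableEq α] (l : List α) (h : reduce1 l ≠ l) :
    (reduce1 l).length < l.length := by
  fun_induction reduce1 with
  | case1 => simp at h
  | case2 a l htw ih =>
      have hd : l.dropWhile (· = a) = l := by
        rw [dropWhile_eq_drop, htw]; simp
      simp only [hd] at h ih
      have hne : reduce1 l ≠ l := by intro he; apply h; simp [he]
      have := ih hne; simp [hd]; omega
  | case3 a l htw ih =>
      have h1 := length_reduce1_le (l.dropWhile (· = a))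
      have h4 : (l.dropWhile (· = a)).length = l.length - (l.takeWhile (· = a)).length := by
        rw [dropWhile_eq_drop]; simp
      simp; omega

theorem mem_reduce1 {α : Type} [DecidableEq α] (l : List α) (x : α) (h : x ∈ reduce1 l) :
    x ∈ l := by
  fun_induction reduce1 with
  | case1 => simp at h
  | case2 a l htw ih =>
      rcases List.mem_cons.mp h with h | h
      · simp [h]
      · right; exact (List.dropWhile_sublist (· = a)).mem (ih h)
  | case3 a l htw ih =>
      right; exact (List.dropWhile_sublist (· = a)).mem (ih h)

theorem reduce1_eq_of_length_eq {α : Type} [DecidableEq α] (l : List α)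
    (h : (reduce1 l).length = l.length) : reduce1 l = l := by
  by_contra hne
  have := reduce1_lt_of_ne l hne
  omega

-- total number of characters removed by iterating rounds to the fixpoint
def removedTotal {α : Type} [DecidableEq α] (l : List α) : Nat :=
  if reduce1 l = l then 0
  else (l.length - (reduce1 l).length) + removedTotal (reduce1 l)
termination_by l.length
decreasing_by exact reduce1_lt_of_ne l (by assumption)

theorem removedTotal_le {α : Type} [DecidableEq α] (l : List α) :
    removedTotal l ≤ l.length := by
  fun_induction removedTotal with
  | case1 => omega
  | case2 l h ih =>
      have := length_reduce1_le l
      omega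

theorem takeWhile_append_single {α : Type} [DecidableEq α] (l : List α) (v x : α)
    (h : ¬ (x = v)) : ((l ++ [x]).takeWhile (· = v)) = l.takeWhile (· = v) := by
  induction l with
  | nil => simp [h]
  | cons b l ih => by_cases hb : b = v <;> simp [hb, ih]

-- A-side: the scan, the interval loop, the reversed deletions ------------------

theorem aScan_spec (tt' : List (List Char)) (v : List Char) (i : Nat)
    (h : tt'[i]? = some v) :
    aScan tt' v i = i + ((tt'.drop (i + 1)).takeWhile (· = v)).length := by
  fun_induction aScan with
  | case1 i hlt hne =>
      rw [List.getElem?_eq_getElem hlt] at h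
      simp_all
  | case2 i hlt heq ih =>
      by_cases h2 : i + 1 < tt'.length
      · rw [List.drop_eq_getElem_cons h2]
        by_cases hv : tt'[i + 1] = v
        · have := ih (by rw [List.getElem?_eq_getElem h2, hv])
          rw [this, List.takeWhile_cons_of_pos (by simp [hv])]
          simp; omega
        · rw [aScan]
          rw [dif_pos h2, if_pos (by simpa using hv),
            List.takeWhile_cons_of_neg (by simpa using hv)]
          simp
      · rw [List.drop_eq_nil_of_le (by omega)]
        rw [aScan, dif_neg h2]
        simp
  | case3 i hlt =>
      rw [List.getElem?_eq_none (by omega)] at h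
      simp at h

theorem aFindEnd_spec (tt : List (List Char)) (start : Nat) (h : start < tt.length)
    (hv : tt[start] ≠ ['$', '$']) :
    aFindEnd tt start = start + ((tt.drop (start + 1)).takeWhile (· = tt[start])).length := by
  have hget : (tt ++ [['$', '$']]).getD start [] = tt[start] := by
    rw [List.getD, List.getElem?_append_left h, List.getElem?_eq_getElem h]
    rfl
  show aScan (tt ++ [['$', '$']]) ((tt ++ [['$', '$']]).getD start []) start = _
  rw [hget, aScan_spec _ _ _ (by rw [List.getElem?_append_left h, List.getElem?_eq_getElem h]),
    List.drop_append_of_le_length (by omega),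
    takeWhile_append_single _ _ _ (by simpa using fun he => hv he.symm)]

theorem aLoop_stop (tt : List (List Char)) (idx : Nat) (rm : List (Nat × Nat))
    (h : ¬ idx < tt.length - 1) : aLoop tt idx rm = rm := by
  rw [aLoop.eq_def, dif_neg h]

theorem aLoop_acc (tt : List (List Char)) :
    ∀ n idx acc, tt.length - idx ≤ n →
      aLoop tt idx acc = acc ++ aLoop tt idx [] := by
  intro n
  induction n with
  | zero =>
      intro idx acc h
      rw [aLoop_stop tt idx acc (by omega), aLoop_stop tt idx [] (by omega)]
      simp
  | succ n ih =>
      intro idx acc h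
      by_cases h1 : idx < tt.length - 1
      · by_cases h2 : tt[idx]? = tt[idx + 1]?
        · rw [aLoop.eq_def, dif_pos h1, if_pos h2]
          conv_rhs => rw [aLoop.eq_def, dif_pos h1, if_pos h2]
          show aLoop tt (idx + (aFindEnd tt idx - idx) + 1) (acc ++ [(idx, aFindEnd tt idx)]) =
            acc ++ aLoop tt (idx + (aFindEnd tt idx - idx) + 1) ([] ++ [(idx, aFindEnd tt idx)])
          rw [ih _ (acc ++ [(idx, aFindEnd tt idx)]) (by omega),
            ih _ ([] ++ [(idx, aFindEnd tt idx)]) (by omega)]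
          simp
        · rw [aLoop.eq_def, dif_pos h1, if_neg h2]
          conv_rhs => rw [aLoop.eq_def, dif_pos h1, if_neg h2]
          rw [ih _ _ (by omega)]
      · rw [aLoop_stop tt idx acc h1, aLoop_stop tt idx [] h1]
        simp

theorem aDelete_nil (t : List (List Char)) : aDelete t [] = t := rfl

theorem aDelete_cons (t : List (List Char)) (p : Nat × Nat) (r : List (Nat × Nat)) :
    aDelete t (p :: r) = (aDelete t r).take p.1 ++ (aDelete t r).drop (p.2 + 1) := by
  simp [aDelete, List.foldl_append]

-- the heart of the A-side proof: from any index, deleting the collected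
-- intervals (in reverse) performs exactly one reduce1 round on the suffix
theorem aMain (tt : List (List Char)) (hS : ∀ x ∈ tt, x ≠ ['$', '$']) :
    ∀ n idx, tt.length - idx ≤ n →
      aDelete tt (aLoop tt idx []) = tt.take idx ++ reduce1 (tt.drop idx)
      ∧ (aLoop tt idx [] = [] ↔ reduce1 (tt.drop idx) = tt.drop idx) := by
  intro n
  induction n with
  | zero =>
      intro idx h
      rw [aLoop.eq_def, dif_neg (by omega)]
      have hd : tt.drop idx = [] := List.drop_eq_nil_of_le (by omega)
      rw [aDelete_nil, hd]
      refine ⟨?_, by simp [reduce1]⟩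
      simp [reduce1, List.take_of_length_le (show tt.length ≤ idx by omega)]
  | succ n ih =>
      intro idx h
      by_cases h1 : idx < tt.length - 1
      · have hidx : idx < tt.length := by omega
        have hidx1 : idx + 1 < tt.length := by omega
        rw [aLoop.eq_def, dif_pos h1]
        by_cases h2 : tt[idx]? = tt[idx + 1]?
        · rw [if_pos h2]
          simp only []
          rw [List.getElem?_eq_getElem hidx, List.getElem?_eq_getElem hidx1] at h2
          have hvv : tt[idx + 1] = tt[idx] := by simpa using h2.symm
          have hv : tt[idx] ≠ ['$', '$'] := hS _ (List.getElem_mem hidx)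
          have he : aFindEnd tt idx =
              idx + ((tt.drop (idx + 1)).takeWhile (· = tt[idx])).length :=
            aFindEnd_spec tt idx hidx hv
          set k := ((tt.drop (idx + 1)).takeWhile (· = tt[idx])).length with hkdef
          have hdrop1 : tt.drop (idx + 1) = tt[idx + 1] :: tt.drop (idx + 2) :=
            List.drop_eq_getElem_cons hidx1
          have hk1 : 1 ≤ k := by
            rw [hkdef, hdrop1, List.takeWhile_cons_of_pos (by simp [hvv])]
            simp
          have hkle : k ≤ tt.length - (idx + 1) := by
            rw [hkdef]
            have := (List.takeWhile_sublist (l := tt.drop (idx + 1)) (· = tt[idx])).length_le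
            simpa using this
          rw [he, show idx + (idx + k - idx) + 1 = idx + k + 1 from by omega]
          rw [aLoop_acc tt n (idx + k + 1) ([] ++ [(idx, idx + k)]) (by omega)]
          simp only [List.nil_append, List.singleton_append]
          have hrec := ih (idx + k + 1) (by omega)
          rw [aDelete_cons, hrec.1]
          have hlen_take : (tt.take (idx + k + 1)).length = idx + k + 1 :=
            List.length_take_of_le (by omega)
          have hX1 : ((tt.take (idx + k + 1) ++ reduce1 (tt.drop (idx + k + 1))).take idx)
              = tt.take idx := by
            rw [List.take_append_of_le_length (by omega), List.take_take]
            congr 1; omega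
          have hX2 : ((tt.take (idx + k + 1) ++ reduce1 (tt.drop (idx + k + 1))).drop (idx + k + 1))
              = reduce1 (tt.drop (idx + k + 1)) := List.drop_left' hlen_take
          have hdrop0 : tt.drop idx = tt[idx] :: tt.drop (idx + 1) :=
            List.drop_eq_getElem_cons hidx
          have hred : reduce1 (tt.drop idx) = reduce1 (tt.drop (idx + k + 1)) := by
            rw [hdrop0, reduce1, if_neg (by omega)]
            congr 1
            rw [dropWhile_eq_drop, ← hkdef, List.drop_drop]
            congr 1; omega
          refine ⟨by rw [hX1, hX2, hred], ?_, ?_⟩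
          · intro hc; simp at hc
          · intro hr
            exfalso
            have hlen := length_reduce1_le (tt.drop (idx + k + 1))
            have hlt : (reduce1 (tt.drop idx)).length < (tt.drop idx).length := by
              rw [hred]
              simp only [List.length_drop] at hlen ⊢
              omega
            rw [hr] at hlt
            omega
        · rw [if_neg h2]
          rw [List.getElem?_eq_getElem hidx, List.getElem?_eq_getElem hidx1] at h2
          have hne : tt[idx + 1] ≠ tt[idx] := by
            intro he; exact h2 (by simp [he])
          have hrec := ih (idx + 1) (by omega)
          have hdrop0 : tt.drop idx = tt[idx] :: tt.drop (idx + 1) :=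
            List.drop_eq_getElem_cons hidx
          have hdrop1 : tt.drop (idx + 1) = tt[idx + 1] :: tt.drop (idx + 2) :=
            List.drop_eq_getElem_cons hidx1
          have hred : reduce1 (tt.drop idx) = tt[idx] :: reduce1 (tt.drop (idx + 1)) := by
            rw [hdrop0, reduce1]
            rw [if_pos, hdrop1, List.dropWhile_cons_of_neg (by simp [hne]), ← hdrop1]
            rw [hdrop1, List.takeWhile_cons_of_neg (by simp [hne])]
            rfl
          have htake : tt.take (idx + 1) = tt.take idx ++ [tt[idx]] := by
            rw [List.take_add_one, List.getElem?_eq_getElem hidx]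
            rfl
          refine ⟨?_, ?_, ?_⟩
          · rw [hrec.1, hred, htake]
            simp only [List.append_assoc, List.singleton_append]
          · intro hc
            rw [hred, hdrop0, (hrec.2).mp hc]
          · intro hr
            apply (hrec.2).mpr
            rw [hred, hdrop0] at hr
            exact (List.cons.injEq .. ▸ hr).2
      · rw [aLoop.eq_def, dif_neg h1]
        have hd : (tt.drop idx).length ≤ 1 := by simp; omega
        have hfix : reduce1 (tt.drop idx) = tt.drop idx := by
          rcases hm : tt.drop idx with _ | ⟨a, rest⟩
          · simp [reduce1]
          · have hr0 : rest = [] := by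
              have hl := hd
              rw [hm] at hl
              simp only [List.length_cons] at hl
              exact List.eq_nil_of_length_eq_zero (by omega)
            subst hr0
            simp [reduce1]
        exact ⟨by rw [aDelete_nil, hfix, List.take_append_drop], by simp [hfix]⟩


-- remove_number computes count + removedTotal ---------------------------------

theorem removeNumber_spec : ∀ (fuel : Nat) (tt : List (List Char)) (count : Int),
    (∀ x ∈ tt, x ≠ ['$', '$']) → tt.length < fuel →
    removeNumber fuel tt count = count + removedTotal tt := by
  intro fuel
  induction fuel with
  | zero => intro tt count _ hf; omega
  | succ fuel ih =>
      intro tt count hS hf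
      rw [show removeNumber (fuel + 1) tt count =
        (if aLoop tt 0 [] = [] then count
         else removeNumber fuel (aDelete tt (aLoop tt 0 []))
           (count + (tt.length : Int) - ((aDelete tt (aLoop tt 0 [])).length : Int))) from rfl]
      have hmain := aMain tt hS tt.length 0 (by omega)
      simp only [List.take_zero, List.drop_zero, List.nil_append] at hmain
      by_cases hrm : aLoop tt 0 [] = []
      · rw [if_pos hrm]
        have hfix : reduce1 tt = tt := hmain.2.mp hrm
        rw [removedTotal.eq_def, if_pos hfix]
        simp
      · rw [if_neg hrm]
        have hne : reduce1 tt ≠ tt := fun hh => hrm (hmain.2.mpr hh)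
        have hlt := reduce1_lt_of_ne tt hne
        have hS2 : ∀ x ∈ reduce1 tt, x ≠ ['$', '$'] :=
          fun x hx => hS x (mem_reduce1 tt x hx)
        rw [hmain.1, ih (reduce1 tt) _ hS2 (by omega)]
        conv_rhs => rw [removedTotal.eq_def]
        rw [if_neg hne]
        have := length_reduce1_le tt
        push_cast
        omega

-- B-side: bPass is reduce1, bCollapse measures removedTotal -------------------

theorem bRunCount_spec (chars : List Char) (v : Char) (i : Nat) :
    bRunCount chars v i = i + ((chars.drop i).takeWhile (· = v)).length := by
  fun_induction bRunCount with
  | case1 i hlt heq ih =>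
      rw [ih, List.drop_eq_getElem_cons hlt,
        List.takeWhile_cons_of_pos (by simp [heq])]
      simp; omega
  | case2 i hlt hne =>
      rw [List.drop_eq_getElem_cons hlt,
        List.takeWhile_cons_of_neg (by simp [hne])]
      simp
  | case3 i hge =>
      rw [List.drop_eq_nil_of_le (by omega)]
      simp

theorem bPassLoop_spec (chars : List Char) : ∀ (n i : Nat) (out : List Char),
    chars.length - i ≤ n →
    bPassLoop chars i out = out ++ reduce1 (chars.drop i) := by
  intro n
  induction n with
  | zero =>
      intro i out h
      rw [bPassLoop.eq_def, dif_neg (by omega), List.drop_eq_nil_of_le (by omega)]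
      simp [reduce1]
  | succ n ih =>
      intro i out h
      by_cases hi : i < chars.length
      · rw [bPassLoop.eq_def, dif_pos hi]
        show bPassLoop chars (bRunCount chars (chars.getD i default) (i + 1))
            (if bRunCount chars (chars.getD i default) (i + 1) - i = 1
              then out ++ [chars.getD i default] else out)
          = out ++ reduce1 (chars.drop i)
        have hgd : chars.getD i default = chars[i] := by
          rw [List.getD_eq_getElem?_getD, List.getElem?_eq_getElem hi]
          rfl
        rw [hgd]
        set k := ((chars.drop (i + 1)).takeWhile (· = chars[i])).length with hkdef
        have hj : bRunCount chars chars[i] (i + 1) = i + 1 + k := by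
          rw [bRunCount_spec, hkdef]
        rw [hj, ih (i + 1 + k) _ (by omega)]
        have hdrop0 : chars.drop i = chars[i] :: chars.drop (i + 1) :=
          List.drop_eq_getElem_cons hi
        have hdw : (chars.drop (i + 1)).dropWhile (· = chars[i]) = chars.drop (i + 1 + k) := by
          rw [dropWhile_eq_drop, ← hkdef, List.drop_drop]
        rw [hdrop0, reduce1, ← hkdef, hdw]
        by_cases hk : k = 0
        · rw [if_pos (by omega), if_pos hk]
          simp
        · rw [if_neg (by omega), if_neg hk]
      · rw [bPassLoop.eq_def, dif_neg hi, List.drop_eq_nil_of_le (by omega)]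
        simp [reduce1]

theorem bPass_eq (chars : List Char) : bPass chars = reduce1 chars := by
  unfold bPass
  rw [bPassLoop_spec chars chars.length 0 [] (by omega)]
  simp

theorem bCollapse_le : ∀ (fuel : Nat) (chars : List Char),
    (bCollapse fuel chars).length ≤ chars.length := by
  intro fuel
  induction fuel with
  | zero => intro chars; simp [bCollapse]
  | succ fuel ih =>
      intro chars
      show (if (bPass chars).length = chars.length then chars
        else bCollapse fuel (bPass chars)).length ≤ chars.length
      by_cases hc : (bPass chars).length = chars.length
      · rw [if_pos hc]
      · rw [if_neg hc]
        calc (bCollapse fuel (bPass chars)).length ≤ (bPass chars).length := ih _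
          _ ≤ chars.length := by rw [bPass_eq]; exact length_reduce1_le chars

theorem bCollapse_spec : ∀ (fuel : Nat) (chars : List Char), chars.length < fuel →
    chars.length - (bCollapse fuel chars).length = removedTotal chars := by
  intro fuel
  induction fuel with
  | zero => intro chars h; omega
  | succ fuel ih =>
      intro chars h
      show chars.length - (if (bPass chars).length = chars.length then chars
        else bCollapse fuel (bPass chars)).length = removedTotal chars
      rw [bPass_eq]
      by_cases hc : (reduce1 chars).length = chars.length
      · rw [if_pos hc, removedTotal.eq_def, if_pos (reduce1_eq_of_length_eq chars hc)]
        omega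
      · rw [if_neg hc]
        have hne : reduce1 chars ≠ chars := fun hh => hc (by rw [hh])
        have hlt := reduce1_lt_of_ne chars hne
        have hstep := ih (reduce1 chars) (by omega)
        have hle := bCollapse_le fuel (reduce1 chars)
        rw [removedTotal.eq_def, if_neg hne]
        omega

-- bridging lists of 1-char strings with lists of chars ------------------------

theorem reduce1_map {α β : Type} [DecidableEq α] [DecidableEq β] (f : α → β)
    (hf : Function.Injective f) : ∀ (n : Nat) (l : List α), l.length ≤ n →
    reduce1 (l.map f) = (reduce1 l).map f := by
  intro n
  induction n with
  | zero =>
      intro l h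
      have : l = [] := List.eq_nil_of_length_eq_zero (by omega)
      subst this
      simp [reduce1]
  | succ n ih =>
      intro l h
      rcases l with _ | ⟨a, l⟩
      · simp [reduce1]
      · have hpred : ((fun x => decide (x = f a)) ∘ f) = fun x => decide (x = a) := by
          funext x; simp [hf.eq_iff]
        rw [List.map_cons, reduce1, reduce1, List.takeWhile_map, List.dropWhile_map, hpred]
        rw [ih (l.dropWhile (· = a))
          (by have := (List.dropWhile_sublist (l := l) (· = a)).length_le
              simp at h; omega)]
        by_cases hk : (l.takeWhile (· = a)).length = 0
        · rw [if_pos (by simp [hk]), if_pos hk, List.map_cons]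
        · rw [if_neg (by simp [hk]), if_neg hk]

theorem removedTotal_map {α β : Type} [DecidableEq α] [DecidableEq β] (f : α → β)
    (hf : Function.Injective f) : ∀ (n : Nat) (l : List α), l.length ≤ n →
    removedTotal (l.map f) = removedTotal l := by
  intro n
  induction n with
  | zero =>
      intro l h
      have : l = [] := List.eq_nil_of_length_eq_zero (by omega)
      subst this
      simp [removedTotal, reduce1]
  | succ n ih =>
      intro l h
      have hr := reduce1_map f hf l.length l le_rfl
      by_cases hc : reduce1 l = l
      · have e1 : removedTotal (l.map f) = 0 := by
          rw [removedTotal.eq_def, if_pos (by rw [hr, hc])]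
        have e2 : removedTotal l = 0 := by
          rw [removedTotal.eq_def, if_pos hc]
        rw [e1, e2]
      · have hne2 : reduce1 (l.map f) ≠ l.map f := by
          rw [hr]
          exact fun hh => hc ((List.map_injective_iff.mpr hf) hh)
        have hlt := reduce1_lt_of_ne l hc
        have ihh := ih (reduce1 l) (by omega)
        have e1 : removedTotal (l.map f) =
            (l.length - (reduce1 l).length) + removedTotal (reduce1 l) := by
          rw [removedTotal.eq_def, if_neg hne2, hr, ihh]
          simp
        have e2 : removedTotal l =
            (l.length - (reduce1 l).length) + removedTotal (reduce1 l) := by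
          rw [removedTotal.eq_def, if_neg hc]
        rw [e1, e2]

-- the max over candidates -----------------------------------------------------

def bestOf (l : List (List Char)) (m : Int) : Int :=
  l.foldl (fun b t => max b ((removedTotal t : Int))) m

theorem bestOf_cons (t : List Char) (rest : List (List Char)) (m : Int) :
    bestOf (t :: rest) m = bestOf rest (max m (removedTotal t : Int)) := rfl

theorem bestOf_le_iff : ∀ (l : List (List Char)) (m c : Int),
    bestOf l m ≤ c ↔ m ≤ c ∧ ∀ t ∈ l, ((removedTotal t : Int)) ≤ c := by
  intro l
  induction l with
  | nil => intro m c; simp [bestOf]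
  | cons t rest ih =>
      intro m c
      rw [bestOf_cons, ih]
      simp only [max_le_iff, List.mem_cons]
      constructor
      · rintro ⟨⟨h1, h2⟩, h3⟩
        exact ⟨h1, fun t' ht' => by rcases ht' with rfl | ht'
                                    · exact h2
                                    · exact h3 _ ht'⟩
      · rintro ⟨h1, h2⟩
        exact ⟨⟨h1, h2 _ (Or.inl rfl)⟩, fun t' ht' => h2 _ (Or.inr ht')⟩

theorem le_bestOf (l : List (List Char)) (m : Int) : m ≤ bestOf l m :=
  ((bestOf_le_iff l m (bestOf l m)).mp le_rfl).1

theorem bestOf_eq_of_mem (l1 l2 : List (List Char)) (m : Int)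
    (hm : ∀ x, x ∈ l1 ↔ x ∈ l2) : bestOf l1 m = bestOf l2 m := by
  apply le_antisymm
  · apply (bestOf_le_iff ..).mpr
    have h := (bestOf_le_iff l2 m (bestOf l2 m)).mp le_rfl
    exact ⟨h.1, fun t ht => h.2 t ((hm t).mp ht)⟩
  · apply (bestOf_le_iff ..).mpr
    have h := (bestOf_le_iff l1 m (bestOf l1 m)).mp le_rfl
    exact ⟨h.1, fun t ht => h.2 t ((hm t).mpr ht)⟩

theorem aMaxLoop_eq : ∀ (l : List (List Char)) (m : Int) (n : Nat),
    (∀ t ∈ l, t.length = n) → m ≤ (n : Int) →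
    aMaxLoop l m = bestOf l m := by
  intro l
  induction l with
  | nil => intro m n _ _; rfl
  | cons t rest ih =>
      intro m n hlen hm
      have hS : ∀ x ∈ t.map (fun c => [c]), x ≠ ['$', '$'] := by
        intro x hx
        simp only [List.mem_map] at hx
        rcases hx with ⟨c, _, rfl⟩
        simp
      have hcount : removeNumber ((t.map (fun c => [c])).length + 1) (t.map (fun c => [c])) 0
          = (removedTotal t : Int) := by
        rw [removeNumber_spec _ _ _ hS (by simp),
          removedTotal_map (fun c => [c]) (fun a b hab => by simpa using hab) t.length t le_rfl]
        simp
      show (if removeNumber ((t.map (fun c => [c])).length + 1) (t.map (fun c => [c])) 0 = (t.length : Int)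
          then removeNumber ((t.map (fun c => [c])).length + 1) (t.map (fun c => [c])) 0
          else if removeNumber ((t.map (fun c => [c])).length + 1) (t.map (fun c => [c])) 0 > m
            then aMaxLoop rest (removeNumber ((t.map (fun c => [c])).length + 1) (t.map (fun c => [c])) 0)
            else aMaxLoop rest m) = bestOf (t :: rest) m
      rw [hcount, bestOf_cons]
      have htn : t.length = n := hlen t (by simp)
      have hrt := removedTotal_le t
      by_cases hEq : (removedTotal t : Int) = (t.length : Int)
      · rw [if_pos hEq]
        have hmax : max m (removedTotal t : Int) = (removedTotal t : Int) :=
          max_eq_right (by rw [hEq]; omega)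
        rw [hmax]
        apply le_antisymm
        · exact le_bestOf ..
        · apply (bestOf_le_iff ..).mpr
          refine ⟨le_rfl, fun t' ht' => ?_⟩
          have h1 := removedTotal_le t'
          have h2 : t'.length = n := hlen t' (by simp [ht'])
          omega
      · rw [if_neg hEq]
        have hrest : ∀ t' ∈ rest, t'.length = n := fun t' ht' => hlen t' (by simp [ht'])
        by_cases hgt : (removedTotal t : Int) > m
        · rw [if_pos hgt, ih _ n hrest (by omega)]
          congr 1
          exact (max_eq_right (le_of_lt hgt)).symm
        · rw [if_neg hgt, ih _ n hrest hm]
          congr 1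
          exact (max_eq_left (by omega)).symm

-- ===== VERDICT (by name: the statement is the Claim_ definition above) =====
-- final assembly --------------------------------------------------------------

theorem candidate_lists_eq (sl ssl : List Char) :
    (PySem.List.pyRange 0 (ssl.length : Int) 1).map
        (fun index => PySem.List.slice ssl (some 0) (some index) ++ sl ++
          PySem.List.slice ssl (some index) none) ++ [ssl ++ sl]
      = (PySem.List.pyRange 0 ((ssl.length : Int) + 1) 1).map
        (fun i => PySem.List.slice ssl none (some i) ++ sl ++
          PySem.List.slice ssl (some i) none) := by
  have hfeq : (fun index : Int => PySem.List.slice ssl (some 0) (some index) ++ sl ++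
        PySem.List.slice ssl (some index) none)
      = (fun i : Int => PySem.List.slice ssl none (some i) ++ sl ++
        PySem.List.slice ssl (some i) none) := by
    funext i
    rw [PySem.List.slice_zero_start]
  rw [hfeq, PySem.List.pyRange_one_succ_right (by positivity), List.map_append]
  congr 1
  simp only [List.map_cons, List.map_nil]
  rw [PySem.List.slice_to_natCast, PySem.List.slice_from_natCast]
  simp

theorem get_max_remove_number_spec : Claim_equal_get_max_remove_number := by
  unfold Claim_equal_get_max_remove_number Spec_get_max_remove_number
  intro s ss _
  simp only [get_max_remove_number, get_max_remove_number_alt]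
  by_cases hg : s.toList = [] ∨ ss.toList = []
  · rw [if_pos hg, if_pos hg]
  · rw [if_neg hg, if_neg hg]
    set sl := s.toList with hsl
    set ssl := ss.toList with hssl
    set cand : Int → List Char := fun i =>
      PySem.List.slice ssl none (some i) ++ sl ++ PySem.List.slice ssl (some i) none
      with hcand
    -- B's fold is bestOf over its candidate list
    have hfun : (fun (best i : Int) =>
          max best (((cand i).length : Int) -
            ((bCollapse ((cand i).length + 1) (cand i)).length : Int)))
        = fun (best i : Int) => max best ((removedTotal (cand i) : Int)) := by
      funext best i
      have h1 := bCollapse_spec ((cand i).length + 1) (cand i) (by omega)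
      have h2 := bCollapse_le ((cand i).length + 1) (cand i)
      congr 1
      omega
    have hB : (PySem.List.pyRange 0 ((ssl.length : Int) + 1) 1).foldl
          (fun (best i : Int) =>
            max best (((cand i).length : Int) -
              ((bCollapse ((cand i).length + 1) (cand i)).length : Int))) 0
        = bestOf ((PySem.List.pyRange 0 ((ssl.length : Int) + 1) 1).map cand) 0 := by
      rw [bestOf, List.foldl_map, hfun]
    -- A's loop is bestOf over the deduplicated candidate list
    set LB := (PySem.List.pyRange 0 ((ssl.length : Int) + 1) 1).map cand with hLB
    have hlenAll : ∀ t ∈ PySem.Set.ofList LB, t.length = ssl.length + sl.length := by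
      intro t ht
      rw [PySem.Set.mem_ofList, hLB] at ht
      simp only [List.mem_map] at ht
      rcases ht with ⟨i, hi, rfl⟩
      rw [PySem.List.mem_pyRange_one] at hi
      rw [hcand]
      simp only []
      rw [PySem.List.slice_to ssl hi.1, PySem.List.slice_from ssl hi.1]
      simp only [List.length_append, List.length_take, List.length_drop]
      omega
    have hA : aMaxLoop (PySem.Set.ofList LB) 0 = bestOf (PySem.Set.ofList LB) 0 :=
      aMaxLoop_eq _ 0 (ssl.length + sl.length) hlenAll (by positivity)
    rw [candidate_lists_eq sl ssl, ← hLB, hA, hB]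
    exact bestOf_eq_of_mem _ _ 0 (fun x => PySem.Set.mem_ofList LB x)
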